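-- pv_equiv track=rewrite | github.com/Krilivye/advent-of-code-2020 | day4/day4.py | divide_batch_by_blank_line
-- ===== SOURCE A (Python) =====
-- def divide_batch_by_blank_line(filefeeder):
--     passports = []
--     a_passport = []
--     for line in filefeeder:
--         if not line.strip():
--             passports.append(a_passport)
--             a_passport = []
--             continue
--         a_passport.append(line)
--     passports.append(a_passport)
--     return passports
-- ===== SOURCE B (Python) =====
-- def divide_batch_by_blank_line(filefeeder):
--     # Two staged passes: first record the indices of the blank lines, then
--     # cut the materialized line list at those indices with slices.
--     lines = list(filefeeder)
--     blanks = [i for i, line in enumerate(lines) if not line.strip()]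
--     groups = []
--     start = 0
--     for b in blanks:
--         groups.append(lines[start:b])
--         start = b + 1
--     groups.append(lines[start:])
--     return groups
-- ===== Notes on version B (the rewrite author's own statement) =====
-- stated objective: alternative
-- what changed: Replaces A's single forward loop with mutable group accumulators by two staged passes: first collect the indices of blank lines, then cut the line list into groups with slices at those indices.
import Mathlib
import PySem

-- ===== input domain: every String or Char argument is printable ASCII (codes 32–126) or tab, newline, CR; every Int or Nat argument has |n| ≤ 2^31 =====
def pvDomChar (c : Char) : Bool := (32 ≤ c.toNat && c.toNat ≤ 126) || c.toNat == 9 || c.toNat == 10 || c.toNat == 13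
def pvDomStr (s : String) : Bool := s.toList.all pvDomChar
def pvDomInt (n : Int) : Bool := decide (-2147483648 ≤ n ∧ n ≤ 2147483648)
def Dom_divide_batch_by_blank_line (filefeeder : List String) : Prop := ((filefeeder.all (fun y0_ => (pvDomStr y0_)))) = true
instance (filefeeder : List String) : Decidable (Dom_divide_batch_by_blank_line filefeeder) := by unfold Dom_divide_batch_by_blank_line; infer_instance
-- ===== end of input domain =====

-- B replaces A's single forward loop with mutable accumulators by two staged
-- passes: collect the blank-line indices, then slice the list at them
-- (alternative decomposition, same cost).

-- ===== PORT A =====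
-- A: one forward loop; a blank line flushes the current group, otherwise the
-- line is appended to the current group; the last group is flushed at the end.
def divide_batch_by_blank_line (filefeeder : List String) : List (List String) :=
  let s := filefeeder.foldl
    (fun (st : List (List String) × List String) line =>
      if PySem.Str.strip line = "" then (st.1 ++ [st.2], [])
      else (st.1, st.2 ++ [line]))
    ([], [])
  s.1 ++ [s.2]

-- ===== PORT B =====
-- B: first pass records the indices of blank lines; second pass cuts the
-- line list with slices lines[start:b], start := b+1, then lines[start:].
def divide_batch_by_blank_line_alt (filefeeder : List String) : List (List String) :=
  let lines := filefeeder
  let blanks := (PySem.List.enumerate lines 0).filterMap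
    (fun p => if PySem.Str.strip p.2 = "" then some p.1 else none)
  let st := blanks.foldl
    (fun (st : List (List String) × Int) b =>
      (st.1 ++ [PySem.List.slice lines (some st.2) (some b)], b + 1))
    ([], 0)
  st.1 ++ [PySem.List.slice lines (some st.2) none]

-- ===== PRECONDITION & SPEC =====
def Spec_divide_batch_by_blank_line (filefeeder : List String) (out : List (List String)) : Prop := out = divide_batch_by_blank_line_alt filefeeder
instance (filefeeder : List String) (out : List (List String)) : Decidable (Spec_divide_batch_by_blank_line filefeeder out) := by unfold Spec_divide_batch_by_blank_line; infer_instance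

-- ===== CLAIM (what is proved, stated in full; the proofs are below) =====
def Claim_equal_divide_batch_by_blank_line : Prop := ∀ (filefeeder : List String), Dom_divide_batch_by_blank_line filefeeder → Spec_divide_batch_by_blank_line filefeeder (divide_batch_by_blank_line filefeeder)

-- ===== LEMMAS AND PROOFS =====

-- Common reference form both ports are reduced to: structural recursion on the lines.
def bsplit : List String → List (List String)
  | [] => [[]]
  | head :: rest =>
    if PySem.Str.strip head = "" then [] :: bsplit rest
    else
      match bsplit rest with
      | [] => [[head]]
      | g :: gs => (head :: g) :: gs

theorem bsplit_ne_nil (l : List String) : bsplit l ≠ [] := by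
  cases l with
  | nil => simp [bsplit]
  | cons h t =>
    simp only [bsplit]
    split
    · simp
    · split <;> simp

-- ---- A = bsplit ----
-- Loop invariant for A's fold: finished groups `ps` plus current group `ap`
-- combine with the recursive result by merging `ap` into its head group.
theorem fold_invariant (l : List String) (ps : List (List String)) (ap : List String) :
    ((l.foldl
        (fun (st : List (List String) × List String) line =>
          if PySem.Str.strip line = "" then (st.1 ++ [st.2], [])
          else (st.1, st.2 ++ [line])) (ps, ap)).1 ++
     [(l.foldl
        (fun (st : List (List String) × List String) line =>
          if PySem.Str.strip line = "" then (st.1 ++ [st.2], [])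
          else (st.1, st.2 ++ [line])) (ps, ap)).2]) =
    ps ++ (match bsplit l with
           | [] => [ap]
           | g :: gs => (ap ++ g) :: gs) := by
  induction l generalizing ps ap with
  | nil => simp [bsplit]
  | cons h t ih =>
    simp only [List.foldl_cons]
    by_cases hb : PySem.Str.strip h = ""
    · simp only [hb, ih, bsplit]
      cases ht : bsplit t with
      | nil => exact absurd ht (bsplit_ne_nil t)
      | cons g gs => simp
    · simp only [if_neg hb, ih, bsplit]
      cases ht : bsplit t with
      | nil => exact absurd ht (bsplit_ne_nil t)
      | cons g gs => simp

theorem a_eq_bsplit (l : List String) : divide_batch_by_blank_line l = bsplit l := by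
  have h := fold_invariant l [] []
  simp only [divide_batch_by_blank_line, h, List.nil_append]
  cases ht : bsplit l with
  | nil => exact absurd ht (bsplit_ne_nil l)
  | cons g gs => simp

-- ---- B = bsplit ----
-- Nat-level view of B's first pass: the positions of the blank lines.
def natBlanks : List String → List Nat
  | [] => []
  | h :: t =>
    if PySem.Str.strip h = "" then 0 :: (natBlanks t).map (· + 1)
    else (natBlanks t).map (· + 1)

theorem blanks_eq_natBlanks (l : List String) (s : Int) :
    (PySem.List.enumerate l s).filterMap
        (fun p => if PySem.Str.strip p.2 = "" then some p.1 else none) =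
      (natBlanks l).map (fun (k : Nat) => s + (k : Int)) := by
  induction l generalizing s with
  | nil => simp [PySem.List.enumerate_nil, natBlanks]
  | cons h t ih =>
    have key : (natBlanks t).map (fun (k : Nat) => (s + 1) + (k : Int)) =
        ((natBlanks t).map (· + 1)).map (fun (k : Nat) => s + (k : Int)) := by
      rw [List.map_map]
      apply List.map_congr_left
      intro k _
      simp only [Function.comp_apply]
      push_cast
      ring
    rw [PySem.List.enumerate_cons, List.filterMap_cons]
    by_cases hb : PySem.Str.strip h = ""
    · simp only [hb, natBlanks, ih, key]
      simp
    · simp only [if_neg hb, natBlanks, ih, key]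

-- Nat-level view of B's second pass: cut `lines` at the given positions,
-- carrying the start cursor.
def chopN (lines : List String) : Nat → List Nat → List (List String)
  | s, [] => [lines.drop s]
  | s, b :: bs => (lines.drop s).take (b - s) :: chopN lines (b + 1) bs

theorem fold_eq_chopN (lines : List String) (bs : List Nat) (g : List (List String)) (s : Nat) :
    (let st := (bs.map (fun (k : Nat) => (k : Int))).foldl
        (fun (st : List (List String) × Int) b =>
          (st.1 ++ [PySem.List.slice lines (some st.2) (some b)], b + 1))
        (g, (s : Int))
     st.1 ++ [PySem.List.slice lines (some st.2) none]) =
    g ++ chopN lines s bs := by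
  induction bs generalizing g s with
  | nil => simp [chopN, PySem.List.slice_from_natCast]
  | cons b bs ih =>
    simp only [List.map_cons, List.foldl_cons, chopN]
    rw [PySem.List.slice_natCast]
    have hcast : (b : Int) + 1 = ((b + 1 : Nat) : Int) := by push_cast; ring
    rw [hcast]
    have := ih (g := g ++ [(lines.drop s).take (b - s)]) (s := b + 1)
    simp only at this ⊢
    rw [this, List.append_assoc]
    rfl

theorem chopN_shift (lines : List String) (h : String) (s : Nat) (bs : List Nat) :
    chopN (h :: lines) (s + 1) (bs.map (· + 1)) = chopN lines s bs := by
  induction bs generalizing s with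
  | nil => simp [chopN]
  | cons b t ih =>
    simp only [List.map_cons, chopN]
    rw [ih (b + 1)]
    congr 1
    simp [Nat.succ_sub_succ]

theorem bsplit_cons_nonblank (h : String) (t : List String) (hb : ¬ PySem.Str.strip h = "")
    (g : List String) (gs : List (List String)) (ht : bsplit t = g :: gs) :
    bsplit (h :: t) = (h :: g) :: gs := by
  simp [bsplit, if_neg hb, ht]

theorem chopN_eq_bsplit (l : List String) : chopN l 0 (natBlanks l) = bsplit l := by
  induction l with
  | nil => simp [natBlanks, chopN, bsplit]
  | cons h t ih =>
    by_cases hb : PySem.Str.strip h = ""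
    · rw [show natBlanks (h :: t) = 0 :: (natBlanks t).map (· + 1) from by
        simp [natBlanks, hb]]
      rw [show bsplit (h :: t) = [] :: bsplit t from by simp [bsplit, hb]]
      simp only [chopN]
      rw [chopN_shift t h 0 (natBlanks t), ih]
      simp
    · simp only [natBlanks, if_neg hb]
      cases hbs : natBlanks t with
      | nil =>
        rw [hbs] at ih
        simp only [List.map_nil, chopN, List.drop_zero] at ih ⊢
        rw [bsplit_cons_nonblank h t hb t [] ih.symm]
      | cons b bs =>
        rw [hbs] at ih
        simp only [List.map_cons, chopN, List.drop_zero, Nat.sub_zero] at ih ⊢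
        have hshift : chopN (h :: t) (b + 1 + 1) (bs.map (· + 1)) = chopN t (b + 1) bs :=
          chopN_shift t h (b + 1) bs
        rw [hshift]
        rw [bsplit_cons_nonblank h t hb (t.take b) (chopN t (b + 1) bs) ih.symm]
        simp [List.take_succ_cons]

theorem b_eq_bsplit (l : List String) : divide_batch_by_blank_line_alt l = bsplit l := by
  have hmap : (natBlanks l).map (fun (k : Nat) => (0 : Int) + (k : Int)) =
      (natBlanks l).map (fun (k : Nat) => (k : Int)) := by simp
  have hfold := fold_eq_chopN l (natBlanks l) [] 0
  simp only [Nat.cast_zero, List.nil_append] at hfold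
  simp only [divide_batch_by_blank_line_alt, blanks_eq_natBlanks l 0, hmap, hfold,
    chopN_eq_bsplit]

-- ===== VERDICT (by name: the statement is the Claim_ definition above) =====
theorem divide_batch_by_blank_line_spec : Claim_equal_divide_batch_by_blank_line := by
  intro l _
  show divide_batch_by_blank_line l = divide_batch_by_blank_line_alt l
  rw [a_eq_bsplit, b_eq_bsplit]
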